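-- pv_equiv track=rewrite | github.com/zongtong009/hackerearth | Vowel-Recognition.py | fun2
-- ===== SOURCE A (Python) =====
-- def fun2(s):
--     sum = 0
--     len_a = len(s)
--     for i in range(len_a+1):
--         for j in range(i, len_a):
--             for k in s[i:][: len_a - j]:
--                 if k in 'aeouiAEOUI':
--                     sum += 1
--     return sum
-- ===== SOURCE B (Python) =====
-- def fun2(s):
--     n = len(s)
--     total = 0
--     for p, c in enumerate(s):
--         if c in 'aeouiAEOUI':
--             total += (p + 1) * (n - p)
--     return total
-- ===== Notes on version B (the rewrite author's own statement) =====
-- stated objective: faster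
-- what changed: Replaced the triple nested loop (for every start i and cut j, rescan the slice counting vowels) by a single pass that adds the closed-form weight (p+1)*(n-p) for each vowel position p.
import Mathlib
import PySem

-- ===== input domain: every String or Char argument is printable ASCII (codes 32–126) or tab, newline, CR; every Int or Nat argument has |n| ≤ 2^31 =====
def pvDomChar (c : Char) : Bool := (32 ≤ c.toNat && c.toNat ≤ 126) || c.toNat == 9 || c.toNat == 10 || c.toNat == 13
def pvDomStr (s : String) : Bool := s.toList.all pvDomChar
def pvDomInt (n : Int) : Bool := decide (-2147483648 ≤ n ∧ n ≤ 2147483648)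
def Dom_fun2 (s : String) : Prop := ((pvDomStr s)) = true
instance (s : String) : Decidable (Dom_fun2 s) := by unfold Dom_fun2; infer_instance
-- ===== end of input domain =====

-- B replaces A's triple nested loop by a single pass adding the closed-form
-- weight (p+1)*(n-p) per vowel position p (objective: faster, asymptotic).

-- ===== PORT A =====
def pvVowels : List Char := "aeouiAEOUI".toList

def fun2 (s : String) : Int :=
  let l := s.toList
  let len_a : Int := l.length
  (PySem.List.pyRange 0 (len_a + 1) 1).foldl (fun sum i =>
    (PySem.List.pyRange i len_a 1).foldl (fun sum j =>
      (PySem.List.slice (PySem.List.slice l (some i) none) none (some (len_a - j))).foldl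
        (fun sum k => if pvVowels.contains k then sum + 1 else sum) sum) sum) 0

-- ===== PORT B =====
def fun2_alt (s : String) : Int :=
  let l := s.toList
  let n : Int := l.length
  (PySem.List.enumerate l 0).foldl (fun total pc =>
    if pvVowels.contains pc.2 then total + (pc.1 + 1) * (n - pc.1) else total) 0

-- ===== PRECONDITION & SPEC =====
def Spec_fun2 (s : String) (out : Int) : Prop := out = fun2_alt s
instance (s : String) (out : Int) : Decidable (Spec_fun2 s out) := by unfold Spec_fun2; infer_instance

-- ===== CLAIM (what is proved, stated in full; the proofs are below) =====
def Claim_equal_fun2 : Prop := ∀ (s : String), Dom_fun2 s → Spec_fun2 s (fun2 s)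

-- ===== LEMMAS AND PROOFS =====

-- vowel indicator and vowel count of a list
def vInt (c : Char) : Int := if pvVowels.contains c then 1 else 0
def VC (t : List Char) : Int := (t.map vInt).sum

-- weight-per-position sum: W t = ∑_p (|t|-p) * vInt t[p], defined structurally
def Wgt : List Char → Int
  | [] => 0
  | c :: t => ((t.length : Int) + 1) * vInt c + Wgt t

-- the closed-form total: G l = ∑_p (p+1)*(|l|-p) * vInt l[p]
def Gsum (l : List Char) : Int :=
  ∑ p ∈ Finset.range l.length, ((p : Int) + 1) * ((l.length : Int) - p) * vInt (l.getD p ' ')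

theorem inner_foldl_eq (t : List Char) (a : Int) :
    t.foldl (fun s k => if pvVowels.contains k then s + 1 else s) a = a + VC t := by
  induction t generalizing a with
  | nil => simp [VC]
  | cons c t ih => simp only [List.foldl_cons, ih, VC, List.map_cons, List.sum_cons, vInt]
                   split <;> ring

theorem VC_take_cons (c : Char) (t : List Char) (m : ℕ) :
    VC ((c :: t).take (m + 1)) = vInt c + VC (t.take m) := by
  simp [VC]

-- prefix sum equals Wgt
theorem prefix_sum_eq_Wgt (t : List Char) :
    ∑ j ∈ Finset.range t.length, VC (t.take (j + 1)) = Wgt t := by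
  induction t with
  | nil => simp [Wgt]
  | cons c t ih =>
    have h1 : ∀ j ∈ Finset.range (t.length + 1),
        VC ((c :: t).take (j + 1)) = vInt c + VC (t.take j) := by
      intro j _; exact VC_take_cons c t j
    calc ∑ j ∈ Finset.range (c :: t).length, VC ((c :: t).take (j + 1))
        = ∑ j ∈ Finset.range (t.length + 1), (vInt c + VC (t.take j)) := by
          simpa using Finset.sum_congr rfl h1
      _ = ((t.length : Int) + 1) * vInt c + ∑ j ∈ Finset.range (t.length + 1), VC (t.take j) := by
          rw [Finset.sum_add_distrib, Finset.sum_const, Finset.card_range]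
          ring
      _ = ((t.length : Int) + 1) * vInt c + Wgt t := by
          rw [Finset.sum_range_succ']
          simpa [VC] using ih
      _ = Wgt (c :: t) := rfl

-- Wgt in closed form
theorem Wgt_closed (t : List Char) :
    Wgt t = ∑ p ∈ Finset.range t.length, ((t.length : Int) - p) * vInt (t.getD p ' ') := by
  induction t with
  | nil => simp [Wgt]
  | cons c t ih =>
    rw [show Wgt (c :: t) = ((t.length : Int) + 1) * vInt c + Wgt t from rfl, ih,
        List.length_cons, Finset.sum_range_succ']
    simp only [List.getD_cons_succ, List.getD_cons_zero]
    rw [add_comm]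
    congr 1
    apply Finset.sum_congr rfl; intro p _; push_cast; ring

-- suffix sum of Wgt equals Gsum
theorem suffix_Wgt_eq_Gsum (l : List Char) :
    ∑ i ∈ Finset.range (l.length + 1), Wgt (l.drop i) = Gsum l := by
  induction l with
  | nil => simp [Wgt, Gsum]
  | cons c t ih =>
    rw [List.length_cons, Finset.sum_range_succ']
    simp only [List.drop_succ_cons, List.drop_zero]
    rw [ih]
    calc Gsum t + Wgt (c :: t)
        = ∑ p ∈ Finset.range t.length,
            (((p : Int) + 1) * ((t.length : Int) - p) * vInt (t.getD p ' ')
              + ((t.length : Int) - p) * vInt (t.getD p ' '))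
          + ((t.length : Int) + 1) * vInt c := by
          rw [show Wgt (c :: t) = ((t.length : Int) + 1) * vInt c + Wgt t from rfl,
              Wgt_closed, Finset.sum_add_distrib]
          simp only [Gsum]; ring
      _ = ∑ p ∈ Finset.range t.length,
            ((p : Int) + 1 + 1) * ((t.length : Int) + 1 - (p + 1)) * vInt (t.getD p ' ')
          + ((t.length : Int) + 1) * vInt c := by
          congr 1
          apply Finset.sum_congr rfl; intro p _; ring
      _ = Gsum (c :: t) := by
          simp only [Gsum, List.length_cons, Finset.sum_range_succ',
            List.getD_cons_succ, List.getD_cons_zero]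
          have hs : ∑ p ∈ Finset.range t.length,
              ((p : Int) + 1 + 1) * ((t.length : Int) + 1 - (p + 1)) * vInt (t.getD p ' ')
            = ∑ p ∈ Finset.range t.length,
              ((((p : ℕ) + 1 : ℕ) : Int) + 1) * (((t.length + 1 : ℕ) : Int) - ((p + 1 : ℕ) : Int)) * vInt (t.getD p ' ') := by
            apply Finset.sum_congr rfl; intro p _; push_cast; ring
          rw [hs]
          push_cast; ring

theorem sum_map_range (m : ℕ) (f : ℕ → Int) :
    ((List.range m).map f).sum = ∑ k ∈ Finset.range m, f k := by
  induction m with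
  | zero => simp
  | succ m ih =>
    rw [List.range_succ, List.map_append, List.sum_append, Finset.sum_range_succ, ih]
    simp

-- reflected prefix sums
theorem refl_sum (t : List Char) :
    ∑ k ∈ Finset.range t.length, VC (t.take (t.length - k)) = Wgt t := by
  have h2 : ∀ k ∈ Finset.range t.length,
      VC (t.take (t.length - k)) = VC (t.take (t.length - 1 - k + 1)) := by
    intro k hk
    rw [Finset.mem_range] at hk
    have : t.length - k = t.length - 1 - k + 1 := by omega
    rw [this]
  rw [Finset.sum_congr rfl h2,
      Finset.sum_range_reflect (fun j => VC (t.take (j + 1))) t.length]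
  exact prefix_sum_eq_Wgt t

-- the middle loop's slice sums equal the positional weight sum of the suffix
theorem mid_sum (l : List Char) (i : Int) (h0 : 0 ≤ i) (hle : i ≤ (l.length : Int)) :
    ((PySem.List.pyRange i (l.length : Int) 1).map
      (fun j => VC ((l.drop i.toNat).take (((l.length : Int) - j).toNat)))).sum
    = Wgt (l.drop i.toNat) := by
  rw [PySem.List.pyRange_one, List.map_map, sum_map_range]
  have hcount : ((l.length : Int) - i).toNat = (l.drop i.toNat).length := by
    rw [List.length_drop]; omega
  rw [hcount]
  have hb : ∀ k ∈ Finset.range (l.drop i.toNat).length,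
      (((fun j => VC ((l.drop i.toNat).take (((l.length : Int) - j).toNat))) ∘
        fun k : ℕ => i + (k : Int)) k)
      = VC ((l.drop i.toNat).take ((l.drop i.toNat).length - k)) := by
    intro k hk
    rw [Finset.mem_range, List.length_drop] at hk
    simp only [Function.comp_apply]
    have harg : ((l.length : Int) - (i + (k : Int))).toNat = (l.drop i.toNat).length - k := by
      rw [List.length_drop]; omega
    rw [harg]
  rw [Finset.sum_congr rfl hb, refl_sum]

-- the middle loop as a foldl
theorem midfold (l : List Char) (i : Int) (h0 : 0 ≤ i) (hle : i ≤ (l.length : Int)) (acc : Int) :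
    (PySem.List.pyRange i (l.length : Int) 1).foldl (fun sum j =>
      (PySem.List.slice (PySem.List.slice l (some i) none) none (some ((l.length : Int) - j))).foldl
        (fun sum k => if pvVowels.contains k then sum + 1 else sum) sum) acc
    = acc + Wgt (l.drop i.toNat) := by
  have hcong : ∀ (a : Int) (j : Int), j ∈ PySem.List.pyRange i (l.length : Int) 1 →
      (PySem.List.slice (PySem.List.slice l (some i) none) none (some ((l.length : Int) - j))).foldl
        (fun sum k => if pvVowels.contains k then sum + 1 else sum) a
      = a + VC ((l.drop i.toNat).take (((l.length : Int) - j).toNat)) := by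
    intro a j hj
    obtain ⟨hij, hjn⟩ := PySem.List.mem_pyRange_one.mp hj
    rw [PySem.List.slice_from l h0, PySem.List.slice_to _ (by omega), inner_foldl_eq]
  rw [PySem.List.foldl_congr_mem _ _ _ _ hcong, PySem.List.foldl_add, mid_sum l i h0 hle]

theorem fun2_eq_Gsum (s : String) : fun2 s = Gsum s.toList := by
  have main : ∀ l : List Char,
      (PySem.List.pyRange 0 ((l.length : Int) + 1) 1).foldl (fun sum i =>
        (PySem.List.pyRange i (l.length : Int) 1).foldl (fun sum j =>
          (PySem.List.slice (PySem.List.slice l (some i) none) none (some ((l.length : Int) - j))).foldl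
            (fun sum k => if pvVowels.contains k then sum + 1 else sum) sum) sum) 0 = Gsum l := by
    intro l
    have hcong : ∀ (a : Int) (i : Int), i ∈ PySem.List.pyRange 0 ((l.length : Int) + 1) 1 →
        (PySem.List.pyRange i (l.length : Int) 1).foldl (fun sum j =>
          (PySem.List.slice (PySem.List.slice l (some i) none) none (some ((l.length : Int) - j))).foldl
            (fun sum k => if pvVowels.contains k then sum + 1 else sum) sum) a
        = a + Wgt (l.drop i.toNat) := by
      intro a i hi
      obtain ⟨h0, h1⟩ := PySem.List.mem_pyRange_one.mp hi
      exact midfold l i h0 (by omega) a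
    rw [PySem.List.foldl_congr_mem _ _ _ _ hcong, PySem.List.foldl_add, PySem.List.pyRange_one,
        List.map_map, sum_map_range]
    have hc2 : (((l.length : Int) + 1 - 0).toNat) = l.length + 1 := by omega
    rw [hc2]
    have h3 : ∀ k ∈ Finset.range (l.length + 1),
        (((fun i : Int => Wgt (l.drop i.toNat)) ∘ fun k : ℕ => (0 : Int) + (k : Int)) k)
        = Wgt (l.drop k) := by
      intro k _
      simp [Function.comp]
    rw [Finset.sum_congr rfl h3, suffix_Wgt_eq_Gsum]
    simp
  exact main s.toList

theorem enum_fold (n : Int) : ∀ (l : List Char) (st a : Int),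
    (PySem.List.enumerate l st).foldl (fun total pc =>
      if pvVowels.contains pc.2 then total + (pc.1 + 1) * (n - pc.1) else total) a
    = a + ∑ p ∈ Finset.range l.length, (st + (p : Int) + 1) * (n - (st + p)) * vInt (l.getD p ' ')
  | [], st, a => by simp [PySem.List.enumerate]
  | c :: t, st, a => by
    rw [PySem.List.enumerate_cons, List.foldl_cons, enum_fold n t (st + 1) _]
    rw [List.length_cons, Finset.sum_range_succ']
    simp only [List.getD_cons_succ, List.getD_cons_zero]
    have hs : ∑ p ∈ Finset.range t.length,
        (st + 1 + (p : Int) + 1) * (n - (st + 1 + p)) * vInt (t.getD p ' ')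
      = ∑ p ∈ Finset.range t.length,
        (st + ((p + 1 : ℕ) : Int) + 1) * (n - (st + ((p + 1 : ℕ) : Int))) * vInt (t.getD p ' ') := by
      apply Finset.sum_congr rfl; intro p _; push_cast; ring
    rw [hs]
    by_cases hc : pvVowels.contains c = true
    · simp only [vInt, hc, if_true]
      push_cast; ring
    · simp only [vInt, hc, if_false, Bool.false_eq_true]
      push_cast; ring

theorem fun2_alt_eq_Gsum (s : String) : fun2_alt s = Gsum s.toList := by
  have h := enum_fold ((s.toList.length : Int)) s.toList 0 0
  have main : fun2_alt s
      = 0 + ∑ p ∈ Finset.range s.toList.length,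
          ((0 : Int) + (p : Int) + 1) * ((s.toList.length : Int) - (0 + p)) * vInt (s.toList.getD p ' ') := h
  rw [main]
  simp only [Gsum, zero_add]

-- ===== VERDICT (by name: the statement is the Claim_ definition above) =====
theorem fun2_spec : Claim_equal_fun2 := by
  intro s _
  unfold Spec_fun2
  rw [fun2_eq_Gsum, fun2_alt_eq_Gsum]
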